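-- pv_equiv track=rewrite | github.com/Shriinivas/inkmcp | blender_addon_inkscape_hybrid.py | parse_hybrid_blocks
-- ===== SOURCE A (Python) =====
-- def parse_hybrid_blocks(code):
--     """Parse code into blocks based on magic comments."""
--     lines = code.split('\n')
--     blocks = []
--     current_type = 'local'
--     current_lines = []
--
--     for line in lines:
--         stripped = line.strip()
--         if stripped == '# @local':
--             if current_lines:
--                 blocks.append((current_type, '\n'.join(current_lines)))
--                 current_lines = []
--             current_type = 'local'
--         elif stripped == '# @inkscape':
--             if current_lines:
--                 blocks.append((current_type, '\n'.join(current_lines)))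
--                 current_lines = []
--             current_type = 'inkscape'
--         else:
--             current_lines.append(line)
--
--     if current_lines:
--         blocks.append((current_type, '\n'.join(current_lines)))
--
--     return blocks
-- ===== SOURCE B (Python) =====
-- def _marker(stripped):
--     if stripped == '# @local':
--         return 'local'
--     if stripped == '# @inkscape':
--         return 'inkscape'
--     return None
--
--
-- def parse_hybrid_blocks(code):
--     """Parse code into blocks based on magic comments."""
--     lines = code.split('\n')
--     cuts = [(i, t) for i, t in ((i, _marker(l.strip())) for i, l in enumerate(lines)) if t is not None]
--     blocks = []
--     start, typ = 0, 'local'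
--     for i, t in cuts + [(len(lines), 'local')]:
--         seg = lines[start:i]
--         if seg:
--             blocks.append((typ, '\n'.join(seg)))
--         start, typ = i + 1, t
--     return blocks
-- ===== Notes on version B (the rewrite author's own statement) =====
-- stated objective: alternative
-- what changed: B first collects the indices and types of all marker lines in one pass, then emits the slices of the line list between consecutive cut points, instead of A's single stateful loop with a growing current-lines accumulator.
import Mathlib
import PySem

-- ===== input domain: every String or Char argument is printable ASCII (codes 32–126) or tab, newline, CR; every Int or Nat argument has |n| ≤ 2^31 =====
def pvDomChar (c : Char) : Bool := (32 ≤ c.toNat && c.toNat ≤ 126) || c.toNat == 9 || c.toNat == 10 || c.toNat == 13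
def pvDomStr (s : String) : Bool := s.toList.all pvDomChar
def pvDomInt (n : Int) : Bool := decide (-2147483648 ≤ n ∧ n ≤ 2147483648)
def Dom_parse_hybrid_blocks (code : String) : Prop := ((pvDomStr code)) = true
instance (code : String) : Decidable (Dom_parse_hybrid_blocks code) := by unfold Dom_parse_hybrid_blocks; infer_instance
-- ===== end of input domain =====

-- B collects all marker-line cut points first and then slices the line list between them,
-- instead of A's single stateful loop with a growing current-lines accumulator (objective: alternative).

-- code.split('\n'); the separator is non-empty so split? never returns none (the getD only totalizes)
def pyLines (code : String) : List String := (PySem.Str.split? code "\n").getD []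

-- ===== PORT A =====
-- A's for-loop over lines, state = (current_type, current_lines); blocks are the emitted output
def aLoop : List String → String → List String → List (String × String)
  | [], ct, cur => if cur.isEmpty then [] else [(ct, PySem.Str.join "\n" cur)]
  | l :: rest, ct, cur =>
    let stripped := PySem.Str.strip l
    if stripped == "# @local" then
      (if cur.isEmpty then [] else [(ct, PySem.Str.join "\n" cur)]) ++ aLoop rest "local" []
    else if stripped == "# @inkscape" then
      (if cur.isEmpty then [] else [(ct, PySem.Str.join "\n" cur)]) ++ aLoop rest "inkscape" []
    else
      aLoop rest ct (cur ++ [l])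

def parse_hybrid_blocks (code : String) : List (String × String) :=
  aLoop (pyLines code) "local" []

-- ===== PORT B =====
def markerType (stripped : String) : Option String :=
  if stripped == "# @local" then some "local"
  else if stripped == "# @inkscape" then some "inkscape"
  else none

-- B's enumerate-comprehension: indices and types of all marker lines
def collectCuts (i : Nat) : List String → List (Nat × String)
  | [] => []
  | l :: rest =>
    match markerType (PySem.Str.strip l) with
    | some t => (i, t) :: collectCuts (i + 1) rest
    | none => collectCuts (i + 1) rest

-- B's for-loop over cuts ++ [(len(lines), 'local')], state = (start, typ)
def bLoop (lines : List String) : List (Nat × String) → Nat → String → List (String × String)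
  | [], _, _ => []
  | (i, t) :: rest, start, typ =>
    let seg := PySem.List.slice lines (some (start : Int)) (some (i : Int))
    (if seg.isEmpty then [] else [(typ, PySem.Str.join "\n" seg)]) ++ bLoop lines rest (i + 1) t

def parse_hybrid_blocks_alt (code : String) : List (String × String) :=
  let lines := pyLines code
  bLoop lines (collectCuts 0 lines ++ [(lines.length, "local")]) 0 "local"

-- ===== PRECONDITION & SPEC =====
def Spec_parse_hybrid_blocks (code : String) (out : List (String × String)) : Prop := out = parse_hybrid_blocks_alt code
instance (code : String) (out : List (String × String)) : Decidable (Spec_parse_hybrid_blocks code out) := by unfold Spec_parse_hybrid_blocks; infer_instance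

-- ===== CLAIM (what is proved, stated in full; the proofs are below) =====
def Claim_equal_parse_hybrid_blocks : Prop := ∀ (code : String), Dom_parse_hybrid_blocks code → Spec_parse_hybrid_blocks code (parse_hybrid_blocks code)

-- ===== LEMMAS AND PROOFS =====

-- proof-only: one unfolding step of B's loop, with the pending lines cur prepended to the first segment
def expand (lines : List String) (typ : String) (cur : List String) : List (String × String) :=
  match collectCuts 0 lines ++ [(lines.length, "local")] with
  | [] => []
  | (i, t) :: rest =>
    (if (cur ++ lines.take i).isEmpty then [] else [(typ, PySem.Str.join "\n" (cur ++ lines.take i))])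
      ++ bLoop lines rest (i + 1) t

theorem collectCuts_shift (xs : List String) (i : Nat) :
    collectCuts (i + 1) xs = (collectCuts i xs).map (fun p => (p.1 + 1, p.2)) := by
  induction xs generalizing i with
  | nil => simp [collectCuts]
  | cons l rest ih =>
    cases h : markerType (PySem.Str.strip l) <;> simp [collectCuts, h, ih]

theorem slice_shift (lines : List String) (l : String) (a b : Nat) :
    PySem.List.slice (l :: lines) (some ((a + 1 : Nat) : Int)) (some ((b + 1 : Nat) : Int))
      = PySem.List.slice lines (some (a : Int)) (some (b : Int)) := by
  rw [PySem.List.slice_natCast, PySem.List.slice_natCast]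
  simp [Nat.add_sub_add_right]

theorem bLoop_shift (cuts : List (Nat × String)) (l : String) (lines : List String)
    (start : Nat) (typ : String) :
    bLoop (l :: lines) (cuts.map (fun p => (p.1 + 1, p.2))) (start + 1) typ
      = bLoop lines cuts start typ := by
  induction cuts generalizing start typ with
  | nil => simp [bLoop]
  | cons c rest ih =>
    obtain ⟨i, t⟩ := c
    simp only [List.map_cons, bLoop]
    rw [slice_shift, ih]

theorem bLoop_eq_expand (lines : List String) (typ : String) :
    bLoop lines (collectCuts 0 lines ++ [(lines.length, "local")]) 0 typ = expand lines typ [] := by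
  unfold expand
  cases hc : collectCuts 0 lines ++ [(lines.length, "local")] with
  | nil => have := congrArg List.length hc; simp at this
  | cons c rest =>
    obtain ⟨i, t⟩ := c
    simp only [bLoop]
    rw [PySem.List.slice_natCast]
    simp

-- shifting B's whole cut list (including the sentinel) by one
theorem cutsS_shift (rest : List String) :
    collectCuts 1 rest ++ [(rest.length + 1, "local")]
      = (collectCuts 0 rest ++ [(rest.length, "local")]).map (fun p => (p.1 + 1, p.2)) := by
  rw [show (1 : Nat) = 0 + 1 from rfl, collectCuts_shift]
  simp

theorem aLoop_eq_expand (lines : List String) (typ : String) (cur : List String) :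
    aLoop lines typ cur = expand lines typ cur := by
  induction lines generalizing typ cur with
  | nil =>
    simp [aLoop, expand, collectCuts, bLoop]
  | cons l rest ih =>
    by_cases h1 : PySem.Str.strip l = "# @local"
    · have hm : markerType (PySem.Str.strip l) = some "local" := by simp [markerType, h1]
      simp only [expand, collectCuts, hm, List.length_cons, List.cons_append, List.take_zero,
        List.append_nil]
      rw [cutsS_shift, show (1 : Nat) = 0 + 1 from rfl, bLoop_shift, bLoop_eq_expand, ← ih]
      simp [aLoop, h1]
    · by_cases h2 : PySem.Str.strip l = "# @inkscape"
      · have hm : markerType (PySem.Str.strip l) = some "inkscape" := by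
          simp [markerType, h2]
        simp only [expand, collectCuts, hm, List.length_cons, List.cons_append, List.take_zero,
          List.append_nil]
        rw [cutsS_shift, show (1 : Nat) = 0 + 1 from rfl, bLoop_shift, bLoop_eq_expand, ← ih]
        simp [aLoop, h2]
      · have hm : markerType (PySem.Str.strip l) = none := by simp [markerType, h1, h2]
        simp only [aLoop, beq_iff_eq, if_neg h1, if_neg h2]
        rw [ih typ (cur ++ [l])]
        unfold expand
        simp only [collectCuts, hm, List.length_cons]
        rw [cutsS_shift]
        cases hc : collectCuts 0 rest ++ [(rest.length, "local")] with
        | nil => have := congrArg List.length hc; simp at this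
        | cons c rc =>
          obtain ⟨i, t⟩ := c
          simp only [List.map_cons, List.take_succ_cons]
          rw [bLoop_shift]
          simp

-- ===== VERDICT (by name: the statement is the Claim_ definition above) =====
theorem parse_hybrid_blocks_spec : Claim_equal_parse_hybrid_blocks := by
  intro code _
  unfold Spec_parse_hybrid_blocks parse_hybrid_blocks parse_hybrid_blocks_alt
  rw [aLoop_eq_expand, bLoop_eq_expand]
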